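-- pv_equiv track=rewrite | github.com/liuxsh9/sft-label | src/sft_label/pipeline.py | _normalize_combo_dim
-- ===== SOURCE A (Python) =====
-- def _normalize_combo_dim(labels, dim, limit):
--     """Normalize one combo-key dimension into a bounded list of string tags."""
--     value = labels.get(dim)
--     if isinstance(value, str):
--         value = [value]
--     if not isinstance(value, list):
--         return []
--     cleaned = sorted({item for item in value if isinstance(item, str) and item})
--     if limit > 0:
--         return cleaned[:limit]
--     return cleaned
-- ===== SOURCE B (Python) =====
-- def _normalize_combo_dim(labels, dim, limit):
--     """Normalize one combo-key dimension into a bounded list of string tags.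
--
--     Alternative algorithm: one pass inserting each tag into a strictly-sorted
--     duplicate-free list, instead of building a set and sorting afterwards."""
--     value = labels.get(dim)
--     if isinstance(value, str):
--         value = [value]
--     if not isinstance(value, list):
--         return []
--     out = []
--     for item in value:
--         if isinstance(item, str) and item:
--             i = 0
--             while i < len(out) and out[i] < item:
--                 i += 1
--             if i == len(out) or out[i] != item:
--                 out.insert(i, item)
--     return out[:limit] if limit > 0 else out
-- ===== Notes on version B (the rewrite author's own statement) =====
-- stated objective: alternative
-- what changed: Replaces A's set-comprehension-then-full-sort with a single pass that inserts each non-empty tag into a strictly-sorted duplicate-free list (insertion dedupes and orders at once).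
import Mathlib
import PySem

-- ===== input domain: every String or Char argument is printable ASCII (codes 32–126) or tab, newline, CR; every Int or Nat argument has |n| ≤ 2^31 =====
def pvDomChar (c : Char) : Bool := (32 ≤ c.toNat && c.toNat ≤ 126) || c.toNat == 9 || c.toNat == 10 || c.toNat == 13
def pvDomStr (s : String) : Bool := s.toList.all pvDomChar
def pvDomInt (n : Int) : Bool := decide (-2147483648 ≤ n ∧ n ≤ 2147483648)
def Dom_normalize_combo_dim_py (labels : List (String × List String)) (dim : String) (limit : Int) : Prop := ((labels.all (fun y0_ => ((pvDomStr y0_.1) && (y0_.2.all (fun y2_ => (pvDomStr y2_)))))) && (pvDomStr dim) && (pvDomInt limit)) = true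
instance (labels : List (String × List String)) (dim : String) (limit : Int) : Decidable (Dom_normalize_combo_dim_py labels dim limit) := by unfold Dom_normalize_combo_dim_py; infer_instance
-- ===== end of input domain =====

-- ===== PORT A =====
-- B replaces A's set-then-sort by one pass of sorted duplicate-free insertion (alternative, not faster).
def normalize_combo_dim_py (labels : List (String × List String)) (dim : String) (limit : Int) : List String :=
  match (PySem.Dict.mk labels).get? dim with
  | none => []
  | some value =>
    let cleaned := PySem.List.sorted (PySem.Set.ofList (value.filter (fun item => item != ""))) (fun x => x) false
    if limit > 0 then PySem.List.slice cleaned none (some limit) else cleaned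

-- ===== PORT B =====
-- insert item into a strictly-sorted list: walk past smaller elements, skip if already present
def insSortedTag (item : String) : List String → List String
  | [] => [item]
  | y :: ys =>
    if y < item then y :: insSortedTag item ys
    else if y = item then y :: ys
    else item :: y :: ys

def normalize_combo_dim_py_alt (labels : List (String × List String)) (dim : String) (limit : Int) : List String :=
  match (PySem.Dict.mk labels).get? dim with
  | none => []
  | some value =>
    let out := value.foldl (fun acc item => if item != "" then insSortedTag item acc else acc) []
    if limit > 0 then out.take limit.toNat else out

-- ===== PRECONDITION & SPEC =====
def Spec_normalize_combo_dim_py (labels : List (String × List String)) (dim : String) (limit : Int) (out : List String) : Prop := out = normalize_combo_dim_py_alt labels dim limit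
instance (labels : List (String × List String)) (dim : String) (limit : Int) (out : List String) : Decidable (Spec_normalize_combo_dim_py labels dim limit out) := by unfold Spec_normalize_combo_dim_py; infer_instance

-- ===== CLAIM (what is proved, stated in full; the proofs are below) =====
def Claim_equal_normalize_combo_dim_py : Prop := ∀ (labels : List (String × List String)) (dim : String) (limit : Int), Dom_normalize_combo_dim_py labels dim limit → Spec_normalize_combo_dim_py labels dim limit (normalize_combo_dim_py labels dim limit)

-- ===== LEMMAS AND PROOFS =====
theorem mem_insSortedTag (a item : String) (l : List String) :
    a ∈ insSortedTag item l ↔ a = item ∨ a ∈ l := by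
  induction l with
  | nil => simp [insSortedTag]
  | cons y ys ih =>
    simp only [insSortedTag]
    split_ifs with h1 h2
    · simp only [List.mem_cons, ih]; try tauto
    · subst h2; simp only [List.mem_cons]; try tauto
    · simp only [List.mem_cons]; try tauto

theorem pairwise_insSortedTag (item : String) (l : List String)
    (h : l.Pairwise (· < ·)) : (insSortedTag item l).Pairwise (· < ·) := by
  induction l with
  | nil => simp [insSortedTag]
  | cons y ys ih =>
    simp only [insSortedTag]
    rcases List.pairwise_cons.1 h with ⟨hy, hys⟩
    split_ifs with h1 h2
    · exact List.pairwise_cons.2 ⟨fun a ha => by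
        rcases (mem_insSortedTag a item ys).1 ha with rfl | ha'
        · exact h1
        · exact hy a ha', ih hys⟩
    · exact h
    · refine List.pairwise_cons.2 ⟨fun a ha => ?_, h⟩
      rcases List.mem_cons.1 ha with rfl | ha'
      · exact lt_of_le_of_ne (not_lt.1 h1) (Ne.symm h2)
      · exact lt_trans (lt_of_le_of_ne (not_lt.1 h1) (Ne.symm h2)) (hy a ha')

theorem foldl_ins_pairwise (xs : List String) (acc : List String)
    (h : acc.Pairwise (· < ·)) :
    (xs.foldl (fun a x => insSortedTag x a) acc).Pairwise (· < ·) := by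
  induction xs generalizing acc with
  | nil => simpa using h
  | cons x xs ih => exact ih _ (pairwise_insSortedTag x acc h)

theorem mem_foldl_ins (a : String) (xs : List String) (acc : List String) :
    a ∈ xs.foldl (fun a x => insSortedTag x a) acc ↔ a ∈ acc ∨ a ∈ xs := by
  induction xs generalizing acc with
  | nil => simp
  | cons x xs ih =>
    simp only [List.foldl_cons, ih, mem_insSortedTag, List.mem_cons]
    tauto

theorem foldl_ins_eq_sorted_set (xs : List String) :
    PySem.List.sorted (PySem.Set.ofList xs) (fun x => x) false
      = xs.foldl (fun a x => insSortedTag x a) [] := by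
  have hpw : (xs.foldl (fun a x => insSortedTag x a) []).Pairwise (· < ·) :=
    foldl_ins_pairwise xs [] (by simp)
  refine PySem.List.sorted_eq_of_perm_of_pairwise_lt _ _ _ ?_ hpw
  refine (List.perm_ext_iff_of_nodup (hpw.imp ne_of_lt) (PySem.Set.nodup_ofList _)).2 ?_
  intro a
  rw [mem_foldl_ins, PySem.Set.mem_ofList]
  simp

-- ===== VERDICT (by name: the statement is the Claim_ definition above) =====
theorem normalize_combo_dim_py_spec : Claim_equal_normalize_combo_dim_py := by
  intro labels dim limit _
  unfold Spec_normalize_combo_dim_py normalize_combo_dim_py normalize_combo_dim_py_alt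
  cases h : (PySem.Dict.mk labels).get? dim with
  | none => rfl
  | some value =>
    simp only []
    rw [← List.foldl_filter]
    rw [← foldl_ins_eq_sorted_set]
    by_cases hl : limit > 0
    · simp only [hl, if_true]
      exact PySem.List.slice_to _ hl.le
    · simp [hl]
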